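-- pv_equiv track=rewrite | github.com/um26/Leetcode | 2452-words-within-two-edits-of-dictionary/2452-words-within-two-edits-of-dictionary.py | twoEditWords
-- ===== SOURCE A (Python) =====
-- from typing import List
--
-- def twoEditWords(queries: List[str], dictionary: List[str]) -> List[str]:
--     def is_valid(q, d):
--         diff = 0
--         for i in range(len(q)):
--             if q[i] != d[i]:
--                 diff += 1
--                 if diff > 2:
--                     return False
--         return True
--     ans = []
--     for q in queries:
--         for d in dictionary:
--             if is_valid(q, d):
--                 ans.append(q)
--                 break
--     return ans
-- ===== SOURCE B (Python) =====
-- from typing import List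
--
-- def _masks(w):
--     # all versions of w (as a tuple) with at most 2 positions blanked out
--     t = tuple(w)
--     n = len(t)
--     out = [t]
--     for i in range(n):
--         ti = t[:i] + (None,) + t[i + 1:]
--         out.append(ti)
--         for j in range(i + 1, n):
--             out.append(ti[:j] + (None,) + ti[j + 1:])
--     return out
--
-- def twoEditWords(queries: List[str], dictionary: List[str]) -> List[str]:
--     sigs = set()
--     for d in dictionary:
--         sigs.update(_masks(d))
--     return [q for q in queries if any(m in sigs for m in _masks(q))]
-- ===== Notes on version B (the rewrite author's own statement) =====
-- stated objective: alternative
-- what changed: Replaces A's query-by-dictionary nested character scan with a set of dictionary-word signatures (each word with at most 2 positions blanked), probed with each query's signatures; Pre_ excludes the inputs on which A raises IndexError (a dictionary word shorter than a query, with at most 2 mismatches on the overlap, reached by A's scan); the trade is O(Q*D*L) scanning for O((Q+D)*L^2) hashed signatures of length L.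
-- intended difference: When a query matches no same-length dictionary word within 2 substitutions but does match the prefix of some strictly longer dictionary word, A includes the query (its loop compares only the first len(q) characters of d) while B omits it; the problem asks for words reachable by at most two character edits, which requires equal length, so B's value is the intended one. — e.g. on twoEditWords(["a"], ["ab"]): A returns ["a"], B returns []
import Mathlib
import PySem

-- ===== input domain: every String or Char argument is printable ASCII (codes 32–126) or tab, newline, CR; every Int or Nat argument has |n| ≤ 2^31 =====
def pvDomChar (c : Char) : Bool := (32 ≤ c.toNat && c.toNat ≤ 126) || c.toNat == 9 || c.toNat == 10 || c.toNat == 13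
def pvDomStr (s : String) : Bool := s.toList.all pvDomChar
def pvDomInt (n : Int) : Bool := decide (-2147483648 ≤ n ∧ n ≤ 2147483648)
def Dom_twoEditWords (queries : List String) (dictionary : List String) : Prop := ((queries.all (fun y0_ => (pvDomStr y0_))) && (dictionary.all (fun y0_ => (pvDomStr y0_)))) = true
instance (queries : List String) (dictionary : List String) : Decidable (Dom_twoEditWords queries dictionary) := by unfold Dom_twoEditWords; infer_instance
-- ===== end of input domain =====

-- B replaces A's query×dictionary nested scan by a set of ≤2-position-blanked signatures
-- of the dictionary words, probed with each query's signatures (objective: alternative algorithm).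

-- ===== PORT A =====
-- is_valid's loop 'for i in range(len(q))', with diff counter; d[i] may raise IndexError → Option
def aIsValid (q d : List Char) : List Int → Int → Option Bool
  | [], _ => some true
  | i :: rest, diff =>
    match PySem.List.pyGet? q i, PySem.List.pyGet? d i with
    | some qc, some dc =>
        if qc ≠ dc then
          if diff + 1 > 2 then some false else aIsValid q d rest (diff + 1)
        else aIsValid q d rest diff
    | _, _ => none

-- inner 'for d in dictionary: if is_valid(q,d): append; break'
def aInner (q : List Char) : List String → Option Bool
  | [] => some false
  | d :: ds =>
    match aIsValid q d.toList (PySem.List.pyRange 0 q.length 1) 0 with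
    | none => none
    | some true => some true
    | some false => aInner q ds

def aOuter (dictionary : List String) : List String → List String → Option (List String)
  | [], ans => some ans
  | q :: qs, ans =>
    match aInner q.toList dictionary with
    | none => none
    | some true => aOuter dictionary qs (ans ++ [q])
    | some false => aOuter dictionary qs ans

def twoEditWords (queries : List String) (dictionary : List String) : List String :=
  (aOuter dictionary queries []).getD []

-- ===== PORT B =====
-- _masks(w): all versions of w with ≤ 2 positions blanked (tuple slicing t[:i]+(None,)+t[i+1:] = List.set i none)
def bMasks (w : List Char) : List (List (Option Char)) :=
  let t := w.map some
  let n := t.length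
  (List.range n).foldl
    (fun out i =>
      let ti := t.set i none
      (List.range' (i + 1) (n - (i + 1))).foldl (fun out2 j => out2 ++ [ti.set j none]) (out ++ [ti]))
    [t]

def twoEditWords_alt (queries : List String) (dictionary : List String) : List String :=
  let sigs : PySem.Set (List (Option Char)) :=
    dictionary.foldl (fun s d => PySem.Set.update s (bMasks d.toList)) PySem.Set.empty
  queries.filter (fun q => (bMasks q.toList).any (fun m => PySem.Set.contains sigs m))

-- ===== PRECONDITION & SPEC =====
-- number of mismatching positions on the common prefix
def mismB (q p : List Char) : Nat :=
  (List.range (min q.length p.length)).countP (fun k => decide (q[k]? ≠ p[k]?))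

-- A's matching condition: d at least as long as q, ≤ 2 mismatches on the overlap
def matchB (q d : List Char) : Bool := q.length ≤ d.length && mismB q d ≤ 2

def badB (q d : List Char) : Bool := d.length < q.length && mismB q d ≤ 2

-- Pre_ excludes exactly the inputs on which A raises IndexError: a dictionary word shorter than a
-- query, with ≤ 2 mismatches on the overlap, that A's scan reaches (no earlier dictionary word matches).
def Pre_twoEditWords (queries : List String) (dictionary : List String) : Prop :=
  ∀ q ∈ queries, ∀ k < dictionary.length,
    badB q.toList (dictionary[k]!.toList) = true →
      ∃ d' ∈ dictionary.take k, matchB q.toList d'.toList = true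

instance (queries : List String) (dictionary : List String) : Decidable (Pre_twoEditWords queries dictionary) := by
  unfold Pre_twoEditWords; infer_instance

def pvWitness_twoEditWords : List String × List String := (["abc", "axc"], ["abd", "xyz"])

-- When a query matches no same-length dictionary word within 2 substitutions but does match the
-- prefix of a strictly longer dictionary word, A includes the query (it compares only the first
-- len(q) characters of d) while B omits it; two edits require equal length, so B's value is intended.
def cntD (q d : String) : Nat := (q.toList.zip d.toList).countP (fun c => c.1 != c.2)

def D_twoEditWords (queries : List String) (dictionary : List String) : Prop :=
  ∃ q ∈ queries,
    (∃ d ∈ dictionary, q.toList.length < d.toList.length ∧ cntD q d ≤ 2) ∧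
    ∀ d ∈ dictionary, q.toList.length = d.toList.length → 2 < cntD q d

instance (queries : List String) (dictionary : List String) : Decidable (D_twoEditWords queries dictionary) := by
  unfold D_twoEditWords; infer_instance

def Spec_twoEditWords (queries : List String) (dictionary : List String) (out : List String) : Prop := ¬ D_twoEditWords queries dictionary → out = twoEditWords_alt queries dictionary
instance (queries : List String) (dictionary : List String) (out : List String) : Decidable (Spec_twoEditWords queries dictionary out) := by unfold Spec_twoEditWords; infer_instance

def pvDiffWitness_twoEditWords : List String × List String := (["a"], ["ab"])
def pvDiffWitnessOut_twoEditWords : (List String) × (List String) := (["a"], [])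

-- ===== CLAIM =====
def Claim_unchanged_twoEditWords : Prop := ∀ (queries : List String) (dictionary : List String), Dom_twoEditWords queries dictionary → Pre_twoEditWords queries dictionary → Spec_twoEditWords queries dictionary (twoEditWords queries dictionary)

def Claim_changed_twoEditWords : Prop := Dom_twoEditWords (pvDiffWitness_twoEditWords.1) (pvDiffWitness_twoEditWords.2) ∧ Pre_twoEditWords (pvDiffWitness_twoEditWords.1) (pvDiffWitness_twoEditWords.2) ∧ D_twoEditWords (pvDiffWitness_twoEditWords.1) (pvDiffWitness_twoEditWords.2) ∧ twoEditWords (pvDiffWitness_twoEditWords.1) (pvDiffWitness_twoEditWords.2) = pvDiffWitnessOut_twoEditWords.1 ∧ twoEditWords_alt (pvDiffWitness_twoEditWords.1) (pvDiffWitness_twoEditWords.2) = pvDiffWitnessOut_twoEditWords.2 ∧ pvDiffWitnessOut_twoEditWords.1 ≠ pvDiffWitnessOut_twoEditWords.2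

def Claim_exact_twoEditWords : Prop := ∀ (queries : List String) (dictionary : List String), Dom_twoEditWords queries dictionary → Pre_twoEditWords queries dictionary → D_twoEditWords queries dictionary → twoEditWords queries dictionary ≠ twoEditWords_alt queries dictionary

-- ===== LEMMAS AND PROOFS =====

-- B's matching condition: equal lengths, ≤ 2 mismatches
def matchEq (q d : List Char) : Bool := q.length == d.length && mismB q d ≤ 2

-- a word masked at positions i and j (i = j masks one position)
def mask2 (w : List Char) (i j : Nat) : List (Option Char) :=
  ((w.map some).set i none).set j none

-- structural companion of A's index loop
def goV : List Char → List Char → Int → Option Bool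
  | [], _, _ => some true
  | _ :: _, [], _ => none
  | qc :: qs, dc :: ds, diff =>
    if qc ≠ dc then
      if diff + 1 > 2 then some false else goV qs ds (diff + 1)
    else goV qs ds diff

def predA (dictionary : List String) (q : String) : Bool :=
  dictionary.any (fun d => matchB q.toList d.toList)

def predB (dictionary : List String) (q : String) : Bool :=
  dictionary.any (fun d => matchEq q.toList d.toList)

-- ---- mismB basics ----


theorem mismB_nil_left (d : List Char) : mismB [] d = 0 := by
  simp [mismB]

theorem mismB_nil_right (q : List Char) : mismB q [] = 0 := by
  simp [mismB]

theorem mismB_cons (a b : Char) (q d : List Char) :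
    mismB (a :: q) (b :: d) = (if a = b then 0 else 1) + mismB q d := by
  simp only [mismB, List.length_cons]
  rw [show min (q.length + 1) (d.length + 1) = min q.length d.length + 1 by omega]
  rw [List.range_succ_eq_map]
  rw [List.countP_cons, List.countP_map]
  simp only [Function.comp_def, List.getElem?_cons_succ, List.getElem?_cons_zero]
  by_cases hab : a = b <;> simp [hab, Nat.add_comm]

theorem mismB_eq_zip (q : List Char) : ∀ p : List Char,
    mismB q p = (q.zip p).countP (fun c => c.1 != c.2) := by
  induction q with
  | nil => intro p; simp [mismB]
  | cons a q ih =>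
    intro p
    cases p with
    | nil => simp [mismB]
    | cons b p =>
      rw [mismB_cons a b q p, List.zip_cons_cons, List.countP_cons, ih p]
      by_cases hab : a = b <;> simp [hab, Nat.add_comm]

theorem cntD_eq (q d : String) : cntD q d = mismB q.toList d.toList :=
  (mismB_eq_zip _ _).symm

theorem D_iff (queries dictionary : List String) :
    D_twoEditWords queries dictionary ↔
      ∃ q ∈ queries,
        (∃ d ∈ dictionary, q.toList.length < d.toList.length ∧ mismB q.toList d.toList ≤ 2) ∧
        ¬ ∃ d ∈ dictionary, matchEq q.toList d.toList = true := by
  unfold D_twoEditWords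
  refine exists_congr fun q => and_congr_right fun _ => and_congr ?_ ?_
  · refine exists_congr fun d => and_congr_right fun _ => and_congr_right fun _ => ?_
    rw [cntD_eq]
  · rw [not_exists]
    refine forall_congr' fun d => ?_
    constructor
    · intro h ⟨hd, hm⟩
      simp only [matchEq, Bool.and_eq_true, beq_iff_eq, decide_eq_true_eq] at hm
      have := h hd hm.1
      rw [cntD_eq] at this
      omega
    · intro h hd hlen
      rw [cntD_eq]
      by_contra hc
      exact h ⟨hd, by
        simp only [matchEq, Bool.and_eq_true, beq_iff_eq, decide_eq_true_eq]
        exact ⟨hlen, by omega⟩⟩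


theorem goV_char (q : List Char) : ∀ (d : List Char) (diff : Int), diff ≤ 2 →
    goV q d diff =
      if 2 < (mismB q d : Int) + diff then some false
      else if q.length ≤ d.length then some true else none := by
  induction q with
  | nil =>
    intro d diff h
    simp only [goV, mismB_nil_left]
    rw [if_neg (by push_cast; omega), if_pos (by simp)]
  | cons qc qs ih =>
    intro d diff h
    cases d with
    | nil =>
      simp only [goV, mismB_nil_right]
      rw [if_neg (by push_cast; omega), if_neg (by simp)]
    | cons dc ds =>
      rw [mismB_cons]
      by_cases he : qc = dc
      · have h0 : ((if qc = dc then 0 else 1) + mismB qs ds : Nat) = mismB qs ds := by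
          simp [he]
        rw [h0]
        show goV (qc :: qs) (dc :: ds) diff = _
        simp only [goV, ne_eq, he, not_true_eq_false, if_false]
        rw [ih ds diff h]
        simp only [List.length_cons, Nat.add_le_add_iff_right]
      · have h1 : ((if qc = dc then 0 else 1) + mismB qs ds : Nat) = 1 + mismB qs ds := by
          simp [he]
        rw [h1]
        show goV (qc :: qs) (dc :: ds) diff = _
        simp only [goV, ne_eq, he, not_false_eq_true, if_true]
        by_cases h3 : diff + 1 > 2
        · rw [if_pos h3, if_pos (by push_cast; omega)]
        · rw [if_neg h3, ih ds (diff + 1) (by omega)]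
          have h2 : ((1 + mismB qs ds : Nat) : Int) + diff = (mismB qs ds : Int) + (diff + 1) := by
            push_cast; ring
          rw [h2]
          simp only [List.length_cons, Nat.add_le_add_iff_right]

theorem aIsValid_eq_goV (q d : List Char) : ∀ (a : Nat) (diff : Int),
    aIsValid q d (PySem.List.pyRange a q.length 1) diff = goV (q.drop a) (d.drop a) diff := by
  intro a
  induction hn : q.length - a using Nat.strong_induction_on generalizing a with
  | _ n ihn =>
  intro diff
  by_cases ha : q.length ≤ a
  · rw [PySem.List.pyRange_one_eq_nil (by exact_mod_cast ha)]
    rw [List.drop_eq_nil_of_le ha]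
    rfl
  · push_neg at ha
    rw [PySem.List.pyRange_one_cons (by exact_mod_cast ha)]
    have hq : PySem.List.pyGet? q (a : Int) = some q[a] := by
      rw [PySem.List.pyGet?_natCast q a, List.getElem?_eq_getElem ha]
    rw [List.drop_eq_getElem_cons ha]
    by_cases hd : a < d.length
    · have hdg : PySem.List.pyGet? d (a : Int) = some d[a] := by
        rw [PySem.List.pyGet?_natCast d a, List.getElem?_eq_getElem hd]
      rw [List.drop_eq_getElem_cons hd]
      show aIsValid q d ((a : Int) :: PySem.List.pyRange ((a : Int) + 1) q.length 1) diff = _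
      simp only [aIsValid, hq, hdg]
      have hcast : ((a : Int) + 1) = ((a + 1 : Nat) : Int) := by push_cast; ring
      rw [hcast]
      by_cases he : q[a] = d[a]
      · simp only [goV, ne_eq, he, not_true_eq_false, if_false]
        rw [ihn (q.length - (a + 1)) (by omega) (a + 1) rfl diff]
      · simp only [goV, ne_eq, he, not_false_eq_true, if_true]
        by_cases h3 : diff + 1 > 2
        · simp [h3]
        · simp only [h3, if_false]
          rw [ihn (q.length - (a + 1)) (by omega) (a + 1) rfl (diff + 1)]
    · have hdg : PySem.List.pyGet? d (a : Int) = none := by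
        rw [PySem.List.pyGet?_natCast d a, List.getElem?_eq_none (by omega)]
      rw [show List.drop a d = ([] : List Char) from List.drop_eq_nil_of_le (by omega)]
      show aIsValid q d ((a : Int) :: PySem.List.pyRange ((a : Int) + 1) q.length 1) diff = _
      simp only [aIsValid, hq, hdg]
      rfl

theorem aIsValid_char (q d : List Char) :
    aIsValid q d (PySem.List.pyRange 0 q.length 1) 0 =
      if 2 < mismB q d then some false
      else if q.length ≤ d.length then some true else none := by
  have h := aIsValid_eq_goV q d 0 0
  simp only [Nat.cast_zero, List.drop_zero] at h
  rw [h, goV_char q d 0 (by omega)]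
  by_cases h2 : 2 < mismB q d
  · rw [if_pos (by push_cast; omega), if_pos h2]
  · rw [if_neg (by push_cast; omega), if_neg h2]

theorem aInner_char (q : List Char) (ds : List String)
    (h : ∀ k < ds.length, badB q (ds[k]!.toList) = true →
          ∃ d' ∈ ds.take k, matchB q d'.toList = true) :
    aInner q ds = some (ds.any (fun d => matchB q d.toList)) := by
  induction ds with
  | nil => rfl
  | cons d ds ih =>
    show (match aIsValid q d.toList (PySem.List.pyRange 0 q.length 1) 0 with
      | none => none | some true => some true | some false => aInner q ds) = _
    rw [aIsValid_char]
    by_cases hm : matchB q d.toList = true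
    · have hlen : q.length ≤ d.toList.length := by
        simp [matchB] at hm; exact hm.1
      have hmis : ¬ 2 < mismB q d.toList := by
        simp [matchB] at hm; omega
      rw [if_neg hmis, if_pos hlen]
      simp [List.any_cons, hm]
    · by_cases h2 : 2 < mismB q d.toList
      · rw [if_pos h2]
        have hrec := ih (fun k hk hbad => by
          have := h (k + 1) (by simpa using Nat.succ_lt_succ hk) (by
            rwa [show (d :: ds)[k + 1]! = ds[k]! by
              simp [List.getElem!_eq_getElem?_getD]])
          rcases this with ⟨d', hd', hmd'⟩
          rw [List.take_succ_cons] at hd'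
          rcases List.mem_cons.1 hd' with rfl | hd'2
          · exact absurd hmd' hm
          · exact ⟨d', hd'2, hmd'⟩)
        rw [hrec]
        have : matchB q d.toList = false := by simpa using hm
        simp [List.any_cons, this]
      · exfalso
        have hlen : ¬ q.length ≤ d.toList.length := by
          intro hle
          exact hm (by
            simp only [matchB, Bool.and_eq_true, decide_eq_true_eq]
            exact ⟨hle, by omega⟩)
        have hbad : badB q ((d :: ds)[0]!.toList) = true := by
          simp only [List.getElem!_eq_getElem?_getD, List.getElem?_cons_zero, Option.getD_some]
          simp only [badB, Bool.and_eq_true, decide_eq_true_eq]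
          exact ⟨by omega, by omega⟩
        have := h 0 (by simp) hbad
        simp at this

theorem aOuter_char (dictionary : List String) (qs : List String) :
    (∀ q ∈ qs, aInner q.toList dictionary = some (predA dictionary q)) →
    ∀ (ans : List String),
    aOuter dictionary qs ans = some (ans ++ qs.filter (predA dictionary)) := by
  induction qs with
  | nil => intro _ ans; simp [aOuter]
  | cons q qs ih =>
    intro h ans
    show (match aInner q.toList dictionary with
      | none => none
      | some true => aOuter dictionary qs (ans ++ [q])
      | some false => aOuter dictionary qs ans) = _
    rw [h q (List.mem_cons_self)]
    by_cases hp : predA dictionary q = true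
    · rw [hp]
      show aOuter dictionary qs (ans ++ [q]) = _
      rw [ih (fun q' hq' => h q' (List.mem_cons_of_mem _ hq')) (ans ++ [q])]
      simp [List.filter_cons, hp]
    · rw [show predA dictionary q = false by simpa using hp]
      show aOuter dictionary qs ans = _
      rw [ih (fun q' hq' => h q' (List.mem_cons_of_mem _ hq')) ans]
      simp [List.filter_cons, hp]

-- A's result under Pre_: queries filtered by predA
theorem twoEditWords_char (queries dictionary : List String)
    (hpre : Pre_twoEditWords queries dictionary) :
    twoEditWords queries dictionary = queries.filter (predA dictionary) := by
  unfold twoEditWords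
  rw [aOuter_char dictionary queries
    (fun q hq => aInner_char q.toList dictionary (hpre q hq)) []]
  simp

-- ---- bMasks characterization ----

theorem bMasks_eq (w : List Char) :
    bMasks w = (w.map some) :: (List.range w.length).flatMap (fun i =>
      ((w.map some).set i none) ::
        (List.range' (i + 1) (w.length - (i + 1))).map (fun j => mask2 w i j)) := by
  unfold bMasks
  simp only [List.length_map]
  have hstep : ∀ (out : List (List (Option Char))) (i : Nat),
      (List.range' (i + 1) (w.length - (i + 1))).foldl
        (fun out2 j => out2 ++ [((w.map some).set i none).set j none])
        (out ++ [(w.map some).set i none]) =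
      out ++ (((w.map some).set i none) ::
        (List.range' (i + 1) (w.length - (i + 1))).map (fun j => mask2 w i j)) := by
    intro out i
    rw [PySem.List.foldl_append_singleton_eq_map]
    simp [mask2]
  rw [show (fun (out : List (List (Option Char))) (i : Nat) =>
      (List.range' (i + 1) (w.length - (i + 1))).foldl
        (fun out2 j => out2 ++ [((w.map some).set i none).set j none])
        (out ++ [(w.map some).set i none])) =
      (fun out i => out ++ (((w.map some).set i none) ::
        (List.range' (i + 1) (w.length - (i + 1))).map (fun j => mask2 w i j))) from
    funext fun out => funext fun i => hstep out i]
  rw [PySem.List.foldl_append_eq_flatMap]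
  rfl

theorem mem_bMasks (w : List Char) (m : List (Option Char)) :
    m ∈ bMasks w ↔
      m = w.map some ∨ ∃ i j, i ≤ j ∧ j < w.length ∧ m = mask2 w i j := by
  rw [bMasks_eq]
  simp only [List.mem_cons, List.mem_flatMap, List.mem_range, List.mem_map, List.mem_range'_1]
  constructor
  · rintro (rfl | ⟨i, hi, rfl | ⟨j, ⟨hij, hj⟩, rfl⟩⟩)
    · exact Or.inl rfl
    · refine Or.inr ⟨i, i, le_refl i, hi, ?_⟩
      simp [mask2, List.set_set]
    · exact Or.inr ⟨i, j, by omega, by omega, rfl⟩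
  · rintro (rfl | ⟨i, j, hij, hj, rfl⟩)
    · exact Or.inl rfl
    · rcases Nat.lt_or_ge i j with hlt | hge
      · exact Or.inr ⟨i, by omega, Or.inr ⟨j, ⟨by omega, by omega⟩, rfl⟩⟩
      · have : i = j := by omega
        subst this
        refine Or.inr ⟨i, by omega, Or.inl ?_⟩
        simp [mask2, List.set_set]

theorem length_of_mem_bMasks {w : List Char} {m : List (Option Char)} (h : m ∈ bMasks w) :
    m.length = w.length := by
  rcases (mem_bMasks w m).1 h with rfl | ⟨i, j, _, _, rfl⟩ <;> simp [mask2]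

-- ---- core combinatorial lemmas ----

theorem countP_le_two (l : List Nat) (hl : l.Nodup) (p : Nat → Bool) (i j : Nat)
    (h : ∀ k ∈ l, p k = true → k = i ∨ k = j) : l.countP p ≤ 2 := by
  induction l with
  | nil => simp
  | cons a l ih =>
    rw [List.countP_cons]
    by_cases hp : p a = true
    · rcases h a List.mem_cons_self hp with rfl | rfl
      · have : l.countP p ≤ 1 := by
          calc l.countP p ≤ l.countP (fun k => k == j) := by
                apply List.countP_mono_left
                intro k hk hpk
                rcases h k (List.mem_cons_of_mem _ hk) hpk with rfl | rfl
                · exact absurd hk (List.nodup_cons.1 hl).1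
                · simp
            _ = l.count j := rfl
            _ ≤ 1 := List.nodup_iff_count_le_one.1 (List.nodup_cons.1 hl).2 j
        simp [hp]; omega
      · have : l.countP p ≤ 1 := by
          calc l.countP p ≤ l.countP (fun k => k == i) := by
                apply List.countP_mono_left
                intro k hk hpk
                rcases h k (List.mem_cons_of_mem _ hk) hpk with rfl | rfl
                · simp
                · exact absurd hk (List.nodup_cons.1 hl).1
            _ = l.count i := rfl
            _ ≤ 1 := List.nodup_iff_count_le_one.1 (List.nodup_cons.1 hl).2 i
        simp [hp]; omega
    · have hrec := ih (List.nodup_cons.1 hl).2 (fun k hk hpk => h k (List.mem_cons_of_mem _ hk) hpk)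
      simp [hp]; omega

theorem agree_off_two (q p : List Char) (i j : Nat)
    (h : ∀ k, k < min q.length p.length → k ≠ i → k ≠ j → q[k]? = p[k]?) :
    mismB q p ≤ 2 := by
  unfold mismB
  apply countP_le_two _ (List.nodup_range) _ i j
  intro k hk hpk
  simp only [List.mem_range] at hk
  simp only [decide_eq_true_eq] at hpk
  by_contra hc
  push_neg at hc
  exact hpk (h k hk hc.1 hc.2)

theorem getElem?_mask2_self_left {w : List Char} {i j : Nat} (hi : i < w.length) :
    (mask2 w i j)[i]? = some none := by
  unfold mask2
  by_cases hij : j = i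
  · subst hij
    rw [List.getElem?_set_self (by simpa using hi)]
  · rw [List.getElem?_set_ne (by omega), List.getElem?_set_self (by simpa using hi)]

theorem getElem?_mask2_self_right {w : List Char} {i j : Nat} (hj : j < w.length) :
    (mask2 w i j)[j]? = some none := by
  unfold mask2
  rw [List.getElem?_set_self (by simpa using hj)]

theorem getElem?_mask2_ne {w : List Char} {i j k : Nat} (hki : k ≠ i) (hkj : k ≠ j) :
    (mask2 w i j)[k]? = (w[k]?).map some := by
  unfold mask2
  rw [List.getElem?_set_ne (by omega), List.getElem?_set_ne (by omega), List.getElem?_map]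

theorem masks_inter_mism (q p : List Char) (hlen : q.length = p.length)
    (m : List (Option Char)) (hq : m ∈ bMasks q) (hp : m ∈ bMasks p) :
    mismB q p ≤ 2 := by
  rcases (mem_bMasks q m).1 hq with rfl | ⟨i, j, hij, hjn, hm⟩
  · rcases (mem_bMasks p (q.map some)).1 hp with he | ⟨i, j, hij, hjn, hm⟩
    · apply agree_off_two q p q.length q.length
      intro k hk _ _
      have h0 := congrArg (fun l => l[k]?) he
      simp only [List.getElem?_map] at h0
      exact Option.map_injective (Option.some_injective _) h0
    · exfalso
      have h1 : (q.map some)[j]? = (q[j]?).map some := List.getElem?_map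
      have h2 : (mask2 p i j)[j]? = some none := getElem?_mask2_self_right hjn
      rw [hm] at h1
      rw [h2] at h1
      have hjq : j < q.length := by omega
      rw [List.getElem?_eq_getElem hjq] at h1
      simp at h1
  · rcases (mem_bMasks p m).1 hp with he | ⟨i', j', hij', hjn', hm'⟩
    · exfalso
      have h2 : (mask2 q i j)[j]? = some none := getElem?_mask2_self_right (by omega)
      rw [← hm, he] at h2
      have hjp : j < p.length := by omega
      rw [List.getElem?_map, List.getElem?_eq_getElem hjp] at h2
      simp at h2
    · apply agree_off_two q p i j
      intro k hk hki hkj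
      have hqk : (mask2 q i j)[k]? = (q[k]?).map some := getElem?_mask2_ne hki hkj
      rw [← hm, hm'] at hqk
      by_cases hk' : k = i' ∨ k = j'
      · exfalso
        have : (mask2 p i' j')[k]? = some none := by
          rcases hk' with rfl | rfl
          · exact getElem?_mask2_self_left (by omega)
          · exact getElem?_mask2_self_right (by omega)
        rw [this] at hqk
        have hkq : k < q.length := by omega
        rw [List.getElem?_eq_getElem hkq] at hqk
        simp at hqk
      · push_neg at hk'
        rw [getElem?_mask2_ne hk'.1 hk'.2] at hqk
        have hkq : k < q.length := by omega
        have hkp : k < p.length := by omega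
        rw [List.getElem?_eq_getElem hkq, List.getElem?_eq_getElem hkp] at hqk
        simp only [Option.map_some, Option.some.injEq] at hqk
        rw [List.getElem?_eq_getElem hkq, List.getElem?_eq_getElem hkp]
        exact congrArg some hqk.symm

theorem mask2_congr (q p : List Char) (i j : Nat) (hlen : q.length = p.length)
    (h : ∀ k, k < q.length → k ≠ i → k ≠ j → q[k]? = p[k]?) :
    mask2 q i j = mask2 p i j := by
  apply List.ext_getElem?
  intro k
  by_cases hk : k < q.length
  · by_cases hki : k = i
    · subst hki
      rw [getElem?_mask2_self_left hk, getElem?_mask2_self_left (by omega)]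
    · by_cases hkj : k = j
      · subst hkj
        rw [getElem?_mask2_self_right hk, getElem?_mask2_self_right (by omega)]
      · rw [getElem?_mask2_ne hki hkj, getElem?_mask2_ne hki hkj, h k hk hki hkj]
  · have h1 : (mask2 q i j)[k]? = none := by
      rw [List.getElem?_eq_none]; simp [mask2]; omega
    have h2 : (mask2 p i j)[k]? = none := by
      rw [List.getElem?_eq_none]; simp [mask2]; omega
    rw [h1, h2]

theorem mism_exists_common (q p : List Char) (hlen : q.length = p.length)
    (h : mismB q p ≤ 2) : ∃ m, m ∈ bMasks q ∧ m ∈ bMasks p := by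
  have hminq : min q.length p.length = q.length := by omega
  have hlenb : ((List.range q.length).filter (fun k => decide (q[k]? ≠ p[k]?))).length = mismB q p := by
    unfold mismB
    rw [hminq, List.countP_eq_length_filter]
  have hmemb : ∀ k, k < q.length →
      k ∉ (List.range q.length).filter (fun k => decide (q[k]? ≠ p[k]?)) → q[k]? = p[k]? := by
    intro k hk hnk
    by_contra hne
    exact hnk (by
      simp only [List.mem_filter, List.mem_range, decide_eq_true_eq]
      exact ⟨hk, hne⟩)
  have hcore : ∀ (i j : Nat), i ≤ j → (∀ k, k < q.length → k ≠ i → k ≠ j → q[k]? = p[k]?) →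
      ∃ m, m ∈ bMasks q ∧ m ∈ bMasks p := by
    intro i j hle hij
    by_cases hj : j < q.length
    · by_cases hi : i < q.length
      · exact ⟨mask2 q i j, (mem_bMasks q _).2 (Or.inr ⟨i, j, hle, hj, rfl⟩),
          (mem_bMasks p _).2 (Or.inr ⟨i, j, hle, by omega,
            (mask2_congr q p i j hlen hij).symm ▸ rfl⟩)⟩
      · exact absurd hj (by omega)
    · by_cases hi : i < q.length
      · have hij2 : ∀ k, k < q.length → k ≠ i → k ≠ i → q[k]? = p[k]? := by
          intro k hk hki _
          exact hij k hk hki (by omega)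
        exact ⟨mask2 q i i, (mem_bMasks q _).2 (Or.inr ⟨i, i, le_refl i, hi, rfl⟩),
          (mem_bMasks p _).2 (Or.inr ⟨i, i, le_refl i, by omega,
            (mask2_congr q p i i hlen hij2).symm ▸ rfl⟩)⟩
      · have hqp : q.map some = p.map some := by
          apply List.ext_getElem?
          intro k
          by_cases hk : k < q.length
          · rw [List.getElem?_map, List.getElem?_map, hij k hk (by omega) (by omega)]
          · rw [List.getElem?_eq_none (by simp; omega), List.getElem?_eq_none (by simp; omega)]
        refine ⟨q.map some, (mem_bMasks q _).2 (Or.inl rfl), (mem_bMasks p _).2 (Or.inl hqp)⟩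
  have hagree : ∀ (i j : Nat), (∀ k, k < q.length → k ≠ i → k ≠ j → q[k]? = p[k]?) →
      ∃ m, m ∈ bMasks q ∧ m ∈ bMasks p := by
    intro i j hij
    rcases Nat.le_total i j with hle | hge
    · exact hcore i j hle hij
    · exact hcore j i hge (fun k hk hkj hki => hij k hk hki hkj)
  rcases hval : (List.range q.length).filter (fun k => decide (q[k]? ≠ p[k]?)) with
    _ | ⟨i, _ | ⟨j, _ | ⟨x, rest⟩⟩⟩
  · exact hagree q.length q.length (fun k hk _ _ => hmemb k hk (by rw [hval]; simp))
  · exact hagree i i (fun k hk hki _ => hmemb k hk (by rw [hval]; simp [hki]))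
  · exact hagree i j (fun k hk hki hkj => hmemb k hk (by rw [hval]; simp [hki, hkj]))
  · exfalso
    rw [hval] at hlenb
    simp only [List.length_cons] at hlenb
    omega

-- ---- sigs-set characterization ----

theorem mem_sigs_fold (ds : List String) (s : PySem.Set (List (Option Char)))
    (y : List (Option Char)) :
    y ∈ ds.foldl (fun s d => PySem.Set.update s (bMasks d.toList)) s ↔
      y ∈ s ∨ ∃ d ∈ ds, y ∈ bMasks d.toList := by
  induction ds generalizing s with
  | nil => simp
  | cons d ds ih =>
    simp only [List.foldl_cons]
    rw [ih, PySem.Set.mem_update]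
    constructor
    · rintro ((hy | hyd) | ⟨d', hd', hy⟩)
      · exact Or.inl hy
      · exact Or.inr ⟨d, List.mem_cons_self, hyd⟩
      · exact Or.inr ⟨d', List.mem_cons_of_mem _ hd', hy⟩
    · rintro (hy | ⟨d', hd', hy⟩)
      · exact Or.inl (Or.inl hy)
      · rcases List.mem_cons.1 hd' with rfl | hd'2
        · exact Or.inl (Or.inr hy)
        · exact Or.inr ⟨d', hd'2, hy⟩

-- B's filter predicate is predB
theorem pred_iff (dictionary : List String) (q : String) :
    ((bMasks q.toList).any (fun m =>
        PySem.Set.contains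
          (dictionary.foldl (fun s d => PySem.Set.update s (bMasks d.toList)) PySem.Set.empty)
          m) = true) ↔
      ∃ d ∈ dictionary, matchEq q.toList d.toList = true := by
  rw [List.any_eq_true]
  constructor
  · rintro ⟨m, hmq, hcon⟩
    rw [PySem.Set.contains_iff, mem_sigs_fold] at hcon
    rcases hcon with hmem | ⟨d, hd, hmd⟩
    · simp [PySem.Set.empty] at hmem
    · have hlm : m.length = q.toList.length := length_of_mem_bMasks hmq
      have hlp : m.length = d.toList.length := length_of_mem_bMasks hmd
      refine ⟨d, hd, ?_⟩
      have hmm := masks_inter_mism q.toList d.toList (by omega) m hmq hmd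
      simp only [matchEq, Bool.and_eq_true, beq_iff_eq, decide_eq_true_eq]
      exact ⟨by omega, hmm⟩
  · rintro ⟨d, hd, hmatch⟩
    simp only [matchEq, Bool.and_eq_true, beq_iff_eq, decide_eq_true_eq] at hmatch
    obtain ⟨hlen, hmis⟩ := hmatch
    obtain ⟨m, hmq, hmd⟩ := mism_exists_common q.toList d.toList hlen hmis
    refine ⟨m, hmq, ?_⟩
    rw [PySem.Set.contains_iff, mem_sigs_fold]
    exact Or.inr ⟨d, hd, hmd⟩

theorem alt_char (queries dictionary : List String) :
    twoEditWords_alt queries dictionary = queries.filter (predB dictionary) := by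
  unfold twoEditWords_alt
  apply List.filter_congr
  intro q _
  rw [Bool.eq_iff_iff, pred_iff dictionary q]
  simp [predB, List.any_eq_true]

theorem predB_imp_predA (dictionary : List String) (q : String)
    (h : predB dictionary q = true) : predA dictionary q = true := by
  simp only [predB, List.any_eq_true] at h
  obtain ⟨d, hd, hm⟩ := h
  simp only [matchEq, Bool.and_eq_true, beq_iff_eq, decide_eq_true_eq] at hm
  simp only [predA, List.any_eq_true]
  exact ⟨d, hd, by
    simp only [matchB, Bool.and_eq_true, decide_eq_true_eq]
    exact ⟨by omega, hm.2⟩⟩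

-- strict countP for the tightness proof
theorem countP_lt_of_imp {α : Type} (l : List α) (r p : α → Bool)
    (himp : ∀ x ∈ l, r x = true → p x = true)
    (hx : ∃ x ∈ l, p x = true ∧ r x = false) : l.countP r < l.countP p := by
  induction l with
  | nil => simp at hx
  | cons a l ih =>
    rw [List.countP_cons, List.countP_cons]
    rcases hx with ⟨x, hxl, hpx, hrx⟩
    rcases List.mem_cons.1 hxl with rfl | hxl2
    · rw [hrx, hpx, if_neg (by decide), if_pos rfl]
      have : l.countP r ≤ l.countP p :=
        List.countP_mono_left (fun y hy => himp y (List.mem_cons_of_mem _ hy))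
      omega
    · have hlt := ih (fun y hy => himp y (List.mem_cons_of_mem _ hy)) ⟨x, hxl2, hpx, hrx⟩
      have hra : r a = true → p a = true := himp a List.mem_cons_self
      by_cases hr : r a = true
      · rw [hr, hra hr, if_pos rfl]; omega
      · rw [show r a = false by simpa using hr]
        by_cases hp : p a = true
        · rw [hp, if_pos rfl, if_neg (by decide)]; omega
        · rw [show p a = false by simpa using hp, if_neg (by decide)]; omega

-- ===== VERDICT (by name: the statements are the Claim_ definitions above) =====
theorem twoEditWords_spec : Claim_unchanged_twoEditWords := by
  unfold Claim_unchanged_twoEditWords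
  intro queries dictionary _ hpre
  unfold Spec_twoEditWords
  intro hnd
  rw [twoEditWords_char queries dictionary hpre, alt_char]
  apply List.filter_congr
  intro q hq
  by_cases hB : predB dictionary q = true
  · rw [hB, predB_imp_predA dictionary q hB]
  · have hBf : predB dictionary q = false := by simpa using hB
    rw [hBf]
    by_contra hA
    have hAt : predA dictionary q = true := by simpa using hA
    apply hnd
    rw [D_iff]
    simp only [predA, List.any_eq_true] at hAt
    obtain ⟨d, hd, hm⟩ := hAt
    simp only [matchB, Bool.and_eq_true, decide_eq_true_eq] at hm
    refine ⟨q, hq, ⟨d, hd, ?_, hm.2⟩, ?_⟩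
    · rcases Nat.lt_or_ge q.toList.length d.toList.length with hlt | hge
      · exact hlt
      · exfalso
        have heq : q.toList.length = d.toList.length := by omega
        apply hB
        simp only [predB, List.any_eq_true]
        exact ⟨d, hd, by
          simp only [matchEq, Bool.and_eq_true, beq_iff_eq, decide_eq_true_eq]
          exact ⟨heq, hm.2⟩⟩
    · intro ⟨d', hd', hm'⟩
      exact hB (by
        simp only [predB, List.any_eq_true]
        exact ⟨d', hd', hm'⟩)

theorem twoEditWords_changed : Claim_changed_twoEditWords := by
  unfold Claim_changed_twoEditWords; decide

theorem twoEditWords_tight : Claim_exact_twoEditWords := by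
  unfold Claim_exact_twoEditWords
  intro queries dictionary _ hpre hD
  rw [twoEditWords_char queries dictionary hpre, alt_char]
  intro heq
  obtain ⟨q, hq, ⟨d, hd, hlt, hmis⟩, hnone⟩ := (D_iff _ _).1 hD
  have hA : predA dictionary q = true := by
    simp only [predA, List.any_eq_true]
    exact ⟨d, hd, by
      simp only [matchB, Bool.and_eq_true, decide_eq_true_eq]
      exact ⟨by omega, hmis⟩⟩
  have hBf : predB dictionary q = false := by
    by_contra h
    have h2 : predB dictionary q = true := by simpa using h
    simp only [predB, List.any_eq_true] at h2
    exact hnone h2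
  have hlen := congrArg List.length heq
  rw [← List.countP_eq_length_filter, ← List.countP_eq_length_filter] at hlen
  have := countP_lt_of_imp queries (predB dictionary) (predA dictionary)
    (fun x _ hx => predB_imp_predA dictionary x hx) ⟨q, hq, hA, hBf⟩
  omega
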